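-- pv_equiv track=rewrite | github.com/Beastman99/basic | lawbroke-backend-main/infer_party_demographics_v2.py | infer_race_fallback
-- ===== SOURCE A (Python) =====
-- def infer_race_fallback(name: str) -> str:
--     if not name:
--         return "Unknown"
--     name = name.strip().lower()
--
--     if any(suffix in name for suffix in ["son", "smith", "brown", "jones", "taylor", "miller"]):
--         return "Anglo/European"
--     if any(part in name for part in ["nguyen", "tran", "kim", "chen", "li", "park", "tanaka", "suzuki"]):
--         return "East Asian"
--     if any(part in name for part in ["patel", "singh", "kumar", "sharma", "ahmed", "ali", "khan"]):
--         return "South Asian"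
--     if any(part in name for part in ["hassan", "mohammed", "abdul", "farah", "yousef", "nasir"]):
--         return "Middle Eastern"
--     if any(part in name for part in ["rodriguez", "garcia", "martinez", "silva", "santos", "romano"]):
--         return "Hispanic/Latin"
--     if any(part in name for part in ["okoro", "ade", "nkrumah", "abebe", "diallo", "kamau"]):
--         return "African"
--     if any(part in name for part in ["ski", "ska", "ov", "ova", "ic", "vich", "vic"]):
--         return "Slavic/Eastern European"
--
--     return "Unknown"
-- ===== SOURCE B (Python) =====
-- # B: invert the scan — index all keywords by priority in one dict, then make a
-- # single pass over the name's positions, hashing each candidate substring and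
-- # keeping the minimum priority seen; A instead tests each keyword with `in`.
-- _LABELS = ["Anglo/European", "East Asian", "South Asian", "Middle Eastern",
--            "Hispanic/Latin", "African", "Slavic/Eastern European"]
--
-- _PRIORITY = {
--     "son": 0, "smith": 0, "brown": 0, "jones": 0, "taylor": 0, "miller": 0,
--     "nguyen": 1, "tran": 1, "kim": 1, "chen": 1, "li": 1, "park": 1, "tanaka": 1, "suzuki": 1,
--     "patel": 2, "singh": 2, "kumar": 2, "sharma": 2, "ahmed": 2, "ali": 2, "khan": 2,
--     "hassan": 3, "mohammed": 3, "abdul": 3, "farah": 3, "yousef": 3, "nasir": 3,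
--     "rodriguez": 4, "garcia": 4, "martinez": 4, "silva": 4, "santos": 4, "romano": 4,
--     "okoro": 5, "ade": 5, "nkrumah": 5, "abebe": 5, "diallo": 5, "kamau": 5,
--     "ski": 6, "ska": 6, "ov": 6, "ova": 6, "ic": 6, "vich": 6, "vic": 6,
-- }
--
-- _LENGTHS = (2, 3, 4, 5, 6, 7, 8, 9)  # the distinct keyword lengths, ascending
--
-- def infer_race_fallback(name: str) -> str:
--     if not name:
--         return "Unknown"
--     name = name.strip().lower()
--     best = len(_LABELS)
--     for i in range(len(name)):
--         for L in _LENGTHS: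
--             p = _PRIORITY.get(name[i:i + L])
--             if p is not None and p < best:
--                 best = p
--     return _LABELS[best] if best < len(_LABELS) else "Unknown"
-- ===== Notes on version B (the rewrite author's own statement) =====
-- stated objective: alternative
-- what changed: Inverts the traversal: instead of testing each of 46 keywords with a substring scan in category order, B builds one keyword-to-priority dict and makes a single pass over the name's positions, looking up each candidate substring (one per keyword length) and keeping the minimum priority seen, then maps that priority to its label.
import Mathlib
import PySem

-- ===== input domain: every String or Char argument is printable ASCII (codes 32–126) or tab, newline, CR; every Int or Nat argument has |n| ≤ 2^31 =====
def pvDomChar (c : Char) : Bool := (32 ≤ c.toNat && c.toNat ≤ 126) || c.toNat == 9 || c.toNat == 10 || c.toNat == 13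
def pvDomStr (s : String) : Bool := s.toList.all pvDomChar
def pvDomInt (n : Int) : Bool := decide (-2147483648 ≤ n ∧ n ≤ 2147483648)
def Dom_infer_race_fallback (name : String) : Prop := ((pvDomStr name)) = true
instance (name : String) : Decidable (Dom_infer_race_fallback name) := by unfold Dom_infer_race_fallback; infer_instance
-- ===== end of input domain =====

-- B inverts A's scan: one dict indexes every keyword by category priority, a single pass over the
-- name's positions hashes each candidate substring and keeps the minimum priority (alternative algorithm).


-- ===== PORT A =====
def infer_race_fallback (name : String) : String :=
  if name = "" then "Unknown"
  else
    let name := PySem.Str.lower (PySem.Str.strip name)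
    if ["son", "smith", "brown", "jones", "taylor", "miller"].any
        (fun suffix => PySem.Str.isIn suffix name) then "Anglo/European"
    else if ["nguyen", "tran", "kim", "chen", "li", "park", "tanaka", "suzuki"].any
        (fun part => PySem.Str.isIn part name) then "East Asian"
    else if ["patel", "singh", "kumar", "sharma", "ahmed", "ali", "khan"].any
        (fun part => PySem.Str.isIn part name) then "South Asian"
    else if ["hassan", "mohammed", "abdul", "farah", "yousef", "nasir"].any
        (fun part => PySem.Str.isIn part name) then "Middle Eastern"
    else if ["rodriguez", "garcia", "martinez", "silva", "santos", "romano"].any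
        (fun part => PySem.Str.isIn part name) then "Hispanic/Latin"
    else if ["okoro", "ade", "nkrumah", "abebe", "diallo", "kamau"].any
        (fun part => PySem.Str.isIn part name) then "African"
    else if ["ski", "ska", "ov", "ova", "ic", "vich", "vic"].any
        (fun part => PySem.Str.isIn part name) then "Slavic/Eastern European"
    else "Unknown"

-- ===== PORT B =====
def pvLabels : List String :=
  ["Anglo/European", "East Asian", "South Asian", "Middle Eastern",
   "Hispanic/Latin", "African", "Slavic/Eastern European"]

-- Python dict _PRIORITY (string keys, represented on the chars side as List Char)
def pvPriority : PySem.Dict (List Char) Int :=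
  PySem.Dict.ofList
  [("son".toList, 0),
   ("smith".toList, 0),
   ("brown".toList, 0),
   ("jones".toList, 0),
   ("taylor".toList, 0),
   ("miller".toList, 0),
   ("nguyen".toList, 1),
   ("tran".toList, 1),
   ("kim".toList, 1),
   ("chen".toList, 1),
   ("li".toList, 1),
   ("park".toList, 1),
   ("tanaka".toList, 1),
   ("suzuki".toList, 1),
   ("patel".toList, 2),
   ("singh".toList, 2),
   ("kumar".toList, 2),
   ("sharma".toList, 2),
   ("ahmed".toList, 2),
   ("ali".toList, 2),
   ("khan".toList, 2),
   ("hassan".toList, 3),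
   ("mohammed".toList, 3),
   ("abdul".toList, 3),
   ("farah".toList, 3),
   ("yousef".toList, 3),
   ("nasir".toList, 3),
   ("rodriguez".toList, 4),
   ("garcia".toList, 4),
   ("martinez".toList, 4),
   ("silva".toList, 4),
   ("santos".toList, 4),
   ("romano".toList, 4),
   ("okoro".toList, 5),
   ("ade".toList, 5),
   ("nkrumah".toList, 5),
   ("abebe".toList, 5),
   ("diallo".toList, 5),
   ("kamau".toList, 5),
   ("ski".toList, 6),
   ("ska".toList, 6),
   ("ov".toList, 6),
   ("ova".toList, 6),
   ("ic".toList, 6),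
   ("vich".toList, 6),
   ("vic".toList, 6)]

-- the distinct keyword lengths, ascending (Python _LENGTHS)
def pvLengths : List Nat := [2, 3, 4, 5, 6, 7, 8, 9]

-- inner loop body: for L in _LENGTHS: p = _PRIORITY.get(name[i:i+L]); if p is not None and p < best: best = p
def pvStep (cs : List Char) (b : Int) : Int :=
  pvLengths.foldl (fun b L =>
    match pvPriority.get? (cs.take L) with
    | some p => if p < b then p else b
    | none => b) b

-- outer loop: for i in range(len(name)) — recursion over the suffix starting at i
def pvScan : List Char → Int → Int
  | [], b => b
  | c :: cs, b => pvScan cs (pvStep (c :: cs) b)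

def infer_race_fallback_alt (name : String) : String :=
  if name = "" then "Unknown"
  else
    let name := PySem.Str.lower (PySem.Str.strip name)
    let best := pvScan name.toList 7
    if best < 7 then PySem.List.pyGetD pvLabels best "Unknown" else "Unknown"

-- ===== PRECONDITION & SPEC =====
def Spec_infer_race_fallback (name : String) (out : String) : Prop := out = infer_race_fallback_alt name
instance (name : String) (out : String) : Decidable (Spec_infer_race_fallback name out) := by unfold Spec_infer_race_fallback; infer_instance

-- ===== CLAIM (what is proved, stated in full; the proofs are below) =====
def Claim_equal_infer_race_fallback : Prop := ∀ (name : String), Dom_infer_race_fallback name → Spec_infer_race_fallback name (infer_race_fallback name)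

-- ===== LEMMAS AND PROOFS =====

-- A's seven category keyword lists, in priority order (proof bookkeeping)
def pvCats : List (List String) :=
  [["son", "smith", "brown", "jones", "taylor", "miller"],
   ["nguyen", "tran", "kim", "chen", "li", "park", "tanaka", "suzuki"],
   ["patel", "singh", "kumar", "sharma", "ahmed", "ali", "khan"],
   ["hassan", "mohammed", "abdul", "farah", "yousef", "nasir"],
   ["rodriguez", "garcia", "martinez", "silva", "santos", "romano"],
   ["okoro", "ade", "nkrumah", "abebe", "diallo", "kamau"],
   ["ski", "ska", "ov", "ova", "ic", "vich", "vic"]]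

-- "category i has a keyword occurring in u"
def pvC (u : List Char) (i : Nat) : Bool :=
  (pvCats.getD i []).any (fun k => PySem.Chars.isIn k.toList u)

set_option maxRecDepth 100000 in
theorem pv_table_sound : ∀ kp ∈ pvPriority.items,
    0 ≤ kp.2 ∧ kp.2 < 7 ∧ kp.1.length ∈ pvLengths ∧ kp.1 ∈ (pvCats.getD kp.2.toNat []).map String.toList := by
  decide

set_option maxRecDepth 100000 in
theorem pv_table_complete : ∀ i : Nat, i < 7 → ∀ k ∈ pvCats.getD i [],
    (k.toList, (i : Int)) ∈ pvPriority.items := by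
  decide

set_option maxRecDepth 100000 in
theorem pv_nodup_keys : pvPriority.keys.Nodup := by decide

theorem pvFold_le (cs : List Char) (ls : List Nat) (b : Int) :
    ls.foldl (fun b L =>
      match pvPriority.get? (cs.take L) with
      | some p => if p < b then p else b
      | none => b) b ≤ b := by
  induction ls generalizing b with
  | nil => simp
  | cons L ls ih =>
    simp only [List.foldl_cons]
    refine le_trans (ih _) ?_
    cases h : pvPriority.get? (cs.take L) with
    | none => exact le_refl b
    | some p => show (if p < b then p else b) ≤ b; split <;> omega

theorem pvFold_cases (cs : List Char) (ls : List Nat) (b : Int) :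
    (ls.foldl (fun b L =>
      match pvPriority.get? (cs.take L) with
      | some p => if p < b then p else b
      | none => b) b = b) ∨
    ∃ kp ∈ pvPriority.items,
      (ls.foldl (fun b L =>
        match pvPriority.get? (cs.take L) with
        | some p => if p < b then p else b
        | none => b) b = kp.2) ∧ kp.1 <+: cs := by
  induction ls generalizing b with
  | nil => left; rfl
  | cons L ls ih =>
    simp only [List.foldl_cons]
    cases h : pvPriority.get? (cs.take L) with
    | none => simpa [h] using ih b
    | some p =>
      have hred : (match some p with | some p => if p < b then p else b | none => b) = (if p < b then p else b) := rfl
      rw [hred]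
      rcases ih (if p < b then p else b) with h1 | h1
      · rw [h1]
        split
        · right
          exact ⟨(cs.take L, p), PySem.Dict.mem_items_of_get?_eq_some _ h,
            rfl, List.take_prefix L cs⟩
        · left; rfl
      · right; exact h1

theorem pvFold_le_of_mem (cs : List Char) (ls : List Nat) (b : Int) (L : Nat) (p : Int)
    (hL : L ∈ ls) (hp : pvPriority.get? (cs.take L) = some p) :
    ls.foldl (fun b L =>
      match pvPriority.get? (cs.take L) with
      | some p => if p < b then p else b
      | none => b) b ≤ p := by
  induction ls generalizing b with
  | nil => cases hL
  | cons L' ls ih =>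
    simp only [List.foldl_cons]
    rcases List.mem_cons.1 hL with rfl | hL'
    · refine le_trans (pvFold_le cs ls _) ?_
      rw [hp]
      show (if p < b then p else b) ≤ p
      split <;> omega
    · exact ih _ hL'

theorem pvStep_le (cs : List Char) (b : Int) : pvStep cs b ≤ b := pvFold_le cs pvLengths b

theorem pvStep_cases (cs : List Char) (b : Int) :
    pvStep cs b = b ∨ ∃ kp ∈ pvPriority.items, pvStep cs b = kp.2 ∧ kp.1 <+: cs :=
  pvFold_cases cs pvLengths b

theorem pvStep_le_of_prefix (cs : List Char) (b : Int) (kp : List Char × Int)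
    (hkp : kp ∈ pvPriority.items) (h : kp.1 <+: cs) : pvStep cs b ≤ kp.2 := by
  have hlen : kp.1.length ∈ pvLengths := (pv_table_sound kp hkp).2.2.1
  have htake : cs.take kp.1.length = kp.1 := (List.prefix_iff_eq_take.1 h).symm
  have hget : pvPriority.get? (cs.take kp.1.length) = some kp.2 := by
    rw [htake]; exact PySem.Dict.get?_of_mem_items _ hkp pv_nodup_keys
  exact pvFold_le_of_mem cs pvLengths b kp.1.length kp.2 hlen hget

theorem pvScan_le (cs : List Char) (b : Int) : pvScan cs b ≤ b := by
  induction cs generalizing b with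
  | nil => simp [pvScan]
  | cons c cs ih => exact le_trans (ih _) (pvStep_le _ _)

set_option maxRecDepth 100000 in
theorem pvScan_cases (cs : List Char) (b : Int) :
    pvScan cs b = b ∨ ∃ kp ∈ pvPriority.items, pvScan cs b = kp.2 ∧ kp.1 <:+: cs := by
  induction cs generalizing b with
  | nil => left; rfl
  | cons c cs ih =>
    rcases ih (pvStep (c :: cs) b) with h | ⟨kp, hkp, hv, hinf⟩
    · rcases pvStep_cases (c :: cs) b with h2 | ⟨kp, hkp, hv, hpre⟩
      · left; exact h.trans h2
      · right; exact ⟨kp, hkp, h.trans hv, hpre.isInfix⟩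
    · right; exact ⟨kp, hkp, hv, List.infix_cons hinf⟩

set_option maxRecDepth 100000 in
theorem pvScan_le_of_infix (cs : List Char) (b : Int) (kp : List Char × Int)
    (hkp : kp ∈ pvPriority.items) (h : kp.1 <:+: cs) : pvScan cs b ≤ kp.2 := by
  induction cs generalizing b with
  | nil =>
    exfalso
    have := List.eq_nil_of_infix_nil h
    have hlen : kp.1.length ∈ pvLengths := (pv_table_sound kp hkp).2.2.1
    rw [this] at hlen
    simp [pvLengths] at hlen
  | cons c cs ih =>
    show pvScan cs (pvStep (c :: cs) b) ≤ kp.2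
    rcases List.infix_cons_iff.1 h with hpre | hinf
    · exact le_trans (pvScan_le cs _) (pvStep_le_of_prefix (c :: cs) b kp hkp hpre)
    · exact ih _ hinf

-- if category i matches, the scan result is ≤ i
theorem pvScan_le_of_C (u : List Char) (i : Nat) (hi : i < 7) (h : pvC u i = true) :
    pvScan u 7 ≤ (i : Int) := by
  rcases List.any_eq_true.1 h with ⟨k, hk, hin⟩
  have hinf : k.toList <:+: u := (PySem.Chars.isIn_iff_infix k.toList u).1 hin
  exact pvScan_le_of_infix u 7 (k.toList, (i : Int)) (pv_table_complete i hi k hk) hinf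

-- the scan result is 7 or the index of a matching category
theorem pvScan_mem (u : List Char) :
    pvScan u 7 = 7 ∨ ∃ i : Nat, i < 7 ∧ pvScan u 7 = (i : Int) ∧ pvC u i = true := by
  rcases pvScan_cases u 7 with h | ⟨kp, hkp, hv, hinf⟩
  · left; exact h
  · right
    obtain ⟨h0, h7, _, hmem⟩ := pv_table_sound kp hkp
    refine ⟨kp.2.toNat, by omega, by omega, ?_⟩
    rcases List.mem_map.1 hmem with ⟨k, hk, hkeq⟩
    exact List.any_eq_true.2 ⟨k, hk, (PySem.Chars.isIn_iff_infix k.toList u).2 (hkeq ▸ hinf)⟩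

theorem pvScan_eq_of_first (u : List Char) (j : Nat) (hj : j < 7) (hpos : pvC u j = true)
    (hneg : ∀ i, i < j → pvC u i = false) : pvScan u 7 = (j : Int) := by
  have hle := pvScan_le_of_C u j hj hpos
  rcases pvScan_mem u with h | ⟨i, hi7, hv, hCi⟩
  · omega
  · have : ¬ i < j := fun hlt => by rw [hneg i hlt] at hCi; cases hCi
    rw [hv] at hle ⊢
    have : i = j := by omega
    rw [this]

theorem pvScan_eq_seven (u : List Char) (h : ∀ i, i < 7 → pvC u i = false) :
    pvScan u 7 = 7 := by
  rcases pvScan_mem u with h7 | ⟨i, hi7, _, hCi⟩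
  · exact h7
  · rw [h i hi7] at hCi; cases hCi

-- the scan-then-index result equals the first-match cascade over pvC
theorem pvChain_eq (u : List Char) :
    (if pvScan u 7 < 7 then PySem.List.pyGetD pvLabels (pvScan u 7) "Unknown" else "Unknown") =
    (if pvC u 0 then "Anglo/European"
     else if pvC u 1 then "East Asian"
     else if pvC u 2 then "South Asian"
     else if pvC u 3 then "Middle Eastern"
     else if pvC u 4 then "Hispanic/Latin"
     else if pvC u 5 then "African"
     else if pvC u 6 then "Slavic/Eastern European"
     else "Unknown") := by
  by_cases h0 : pvC u 0 = true
  · rw [pvScan_eq_of_first u 0 (by omega) h0 (fun i hi => absurd hi (by omega))]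
    simp [h0]; decide
  rw [Bool.not_eq_true] at h0
  by_cases h1 : pvC u 1 = true
  · rw [pvScan_eq_of_first u 1 (by omega) h1 (by intro i hi; interval_cases i; assumption)]
    simp [h0, h1]; decide
  rw [Bool.not_eq_true] at h1
  by_cases h2 : pvC u 2 = true
  · rw [pvScan_eq_of_first u 2 (by omega) h2 (by intro i hi; interval_cases i <;> assumption)]
    simp [h0, h1, h2]; decide
  rw [Bool.not_eq_true] at h2
  by_cases h3 : pvC u 3 = true
  · rw [pvScan_eq_of_first u 3 (by omega) h3 (by intro i hi; interval_cases i <;> assumption)]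
    simp [h0, h1, h2, h3]; decide
  rw [Bool.not_eq_true] at h3
  by_cases h4 : pvC u 4 = true
  · rw [pvScan_eq_of_first u 4 (by omega) h4 (by intro i hi; interval_cases i <;> assumption)]
    simp [h0, h1, h2, h3, h4]; decide
  rw [Bool.not_eq_true] at h4
  by_cases h5 : pvC u 5 = true
  · rw [pvScan_eq_of_first u 5 (by omega) h5 (by intro i hi; interval_cases i <;> assumption)]
    simp [h0, h1, h2, h3, h4, h5]; decide
  rw [Bool.not_eq_true] at h5
  by_cases h6 : pvC u 6 = true
  · rw [pvScan_eq_of_first u 6 (by omega) h6 (by intro i hi; interval_cases i <;> assumption)]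
    simp [h0, h1, h2, h3, h4, h5, h6]; decide
  rw [Bool.not_eq_true] at h6
  rw [pvScan_eq_seven u (by intro i hi; interval_cases i <;> assumption)]
  simp [h0, h1, h2, h3, h4, h5, h6]

-- ===== VERDICT (by name: the statement is the Claim_ definition above) =====
theorem infer_race_fallback_spec : Claim_equal_infer_race_fallback := by
  intro name _
  unfold Spec_infer_race_fallback infer_race_fallback infer_race_fallback_alt
  by_cases h : name = ""
  · simp [h]
  · simp only [h, if_false]
    rw [pvChain_eq]
    simp [pvC, pvCats, PySem.Str.isIn_eq]
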